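-- pv_equiv track=rewrite | github.com/YoonDii/ALGORITHM | 프로그래머스/0/181918. 배열 만들기 4/배열 만들기 4.py | solution
-- ===== SOURCE A (Python) =====
-- def solution(arr):
--     stk = []
--     i = 0
--
--     while i < len(arr):
--         if len(stk) == 0 or stk[-1] < arr[i]:
--             stk.append(arr[i])
--             i += 1
--         else:
--             stk.pop(-1)
--
--
--
--     return stk
-- ===== SOURCE B (Python) =====
-- def solution(arr):
--     res = []
--     m = None
--     for x in reversed(arr):
--         if m is None or x < m:
--             res.append(x)
--             m = x
--     res.reverse()
--     return res
-- ===== Notes on version B (the rewrite author's own statement) =====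
-- stated objective: faster
-- what changed: Replaces A's stack-with-pops simulation by a single backward pass that keeps the strictly-decreasing running-minimum records (an element survives iff it is smaller than every element after it), building the result back-to-front and reversing once.
import Mathlib
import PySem

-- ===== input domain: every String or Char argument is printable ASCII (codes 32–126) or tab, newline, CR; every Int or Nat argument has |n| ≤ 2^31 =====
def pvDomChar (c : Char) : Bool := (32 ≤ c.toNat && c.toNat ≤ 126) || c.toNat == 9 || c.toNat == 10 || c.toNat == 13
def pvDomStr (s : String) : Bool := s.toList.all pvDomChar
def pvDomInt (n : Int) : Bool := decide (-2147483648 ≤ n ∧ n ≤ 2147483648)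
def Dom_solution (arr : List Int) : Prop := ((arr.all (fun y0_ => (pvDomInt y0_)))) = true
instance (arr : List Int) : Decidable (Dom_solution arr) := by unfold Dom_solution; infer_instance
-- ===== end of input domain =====

-- B replaces A's stack simulation by a single backward pass keeping the running-minimum
-- records (an element survives iff it is smaller than everything after it); objective: faster (constant factor: no push/pop churn).

-- ===== PORT A =====
-- A's while loop: i advances only when a push happens; the stack top is the last element.
-- The fuel argument is only a structural-termination guard: each iteration decreases the
-- measure 2*(arr.length - i) + stk.length, so fuel 2*arr.length + 1 is never exhausted.
def solutionLoopA (arr : List Int) : Nat → List Int → Nat → List Int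
  | 0, stk, _ => stk
  | fuel + 1, stk, i =>
    if h : i < arr.length then
      let x := arr[i]
      if (match stk.getLast? with | none => true | some t => decide (t < x)) then
        solutionLoopA arr fuel (stk ++ [x]) (i + 1)
      else
        solutionLoopA arr fuel stk.dropLast i
    else stk

def solution (arr : List Int) : List Int := solutionLoopA arr (2 * arr.length + 1) [] 0

-- ===== PORT B =====
-- Source B: for x in reversed(arr): append x (and set m := x) when m is None or x < m; reverse at end.
def solution_alt (arr : List Int) : List Int :=
  (arr.reverse.foldl
    (fun (st : List Int × Option Int) x =>
      match st.2 with
      | none => (st.1 ++ [x], some x)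
      | some m => if x < m then (st.1 ++ [x], some x) else st)
    ([], none)).1.reverse

-- ===== PRECONDITION & SPEC =====
def Spec_solution (arr : List Int) (out : List Int) : Prop := out = solution_alt arr
instance (arr : List Int) (out : List Int) : Decidable (Spec_solution arr out) := by unfold Spec_solution; infer_instance

-- ===== CLAIM (what is proved, stated in full; the proofs are below) =====
def Claim_equal_solution : Prop := ∀ (arr : List Int), Dom_solution arr → Spec_solution arr (solution arr)

-- ===== LEMMAS AND PROOFS =====

-- proof-side helper: pop-from-the-end while top ≥ x (one A-iteration group)
def popGEGo (x : Int) : Nat → List Int → List Int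
  | 0, stk => stk
  | fuel + 1, stk =>
    match stk.getLast? with
    | none => stk
    | some t => if x ≤ t then popGEGo x fuel stk.dropLast else stk

def popGE (stk : List Int) (x : Int) : List Int := popGEGo x stk.length stk

-- proof-side helper: the records of a list under an optional lower threshold
def Rm : Option Int → List Int → List Int
  | _, [] => []
  | none, x :: l => x :: Rm (some x) l
  | some m, x :: l => if x < m then x :: Rm (some x) l else Rm (some m) l

theorem exists_succ_of_getLast?_some {stk : List Int} {t : Int} (hL : stk.getLast? = some t) :
    ∃ k, stk.length = k + 1 := by
  cases stk with
  | nil => simp at hL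
  | cons a l => exact ⟨l.length, rfl⟩

theorem popGE_lt {stk : List Int} {x t : Int} (hL : stk.getLast? = some t) (hlt : t < x) :
    popGE stk x = stk := by
  obtain ⟨k, hk⟩ := exists_succ_of_getLast?_some hL
  unfold popGE
  rw [hk]
  simp [popGEGo, hL]
  omega

theorem popGE_ge {stk : List Int} {x t : Int} (hL : stk.getLast? = some t) (hge : x ≤ t) :
    popGE stk x = popGE stk.dropLast x := by
  obtain ⟨k, hk⟩ := exists_succ_of_getLast?_some hL
  unfold popGE
  rw [hk]
  have hdk : stk.dropLast.length = k := by
    simp [List.length_dropLast, hk]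
  rw [hdk]
  simp [popGEGo, hL, hge]

-- A's loop from index i equals a fold over the remaining suffix, given enough fuel
theorem loopA_foldl (arr : List Int) :
    ∀ fuel stk i, 2 * (arr.length - i) + stk.length < fuel →
      solutionLoopA arr fuel stk i = (arr.drop i).foldl (fun s x => popGE s x ++ [x]) stk := by
  intro fuel
  induction fuel with
  | zero => intro stk i hf; omega
  | succ fuel ih =>
    intro stk i hf
    by_cases h : i < arr.length
    · rw [solutionLoopA]
      simp only [h, dif_pos]
      rw [List.drop_eq_getElem_cons h, List.foldl_cons]
      cases hL : stk.getLast? with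
      | none =>
        have hnil : stk = [] := by
          cases stk with
          | nil => rfl
          | cons a l => simp at hL
        subst hnil
        rw [ih (([] : List Int) ++ [arr[i]]) (i + 1) (by simp; omega)]
        rfl
      | some t =>
        by_cases hlt : t < arr[i]
        · simp only [hlt, decide_true, if_pos]
          rw [popGE_lt hL hlt]
          exact ih (stk ++ [arr[i]]) (i + 1) (by simp; omega)
        · have hle : arr[i] ≤ t := by omega
          simp only [hlt, decide_false, Bool.false_eq_true, if_neg, not_false_iff]
          have hne : stk ≠ [] := by intro hnil; simp [hnil] at hL
          have hlen : stk.dropLast.length + 1 = stk.length := by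
            have := List.length_pos_iff.mpr hne
            simp [List.length_dropLast]; omega
          rw [popGE_ge hL hle]
          rw [ih stk.dropLast i (by omega)]
          rw [List.drop_eq_getElem_cons h, List.foldl_cons]
    · rw [solutionLoopA]
      simp [h, List.drop_eq_nil_of_le (Nat.le_of_not_lt h)]

-- lowering the threshold drops exactly the too-large prefix of the record list
theorem Rm_dropWhile :
    ∀ (l : List Int) (x : Int) (m : Option Int),
      (m = none ∨ ∃ v, m = some v ∧ x ≤ v) →
      Rm (some x) l = (Rm m l).dropWhile (fun r => decide (x ≤ r)) := by
  intro l
  induction l with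
  | nil => intro x m _; cases m <;> simp [Rm]
  | cons y l' ih =>
    intro x m hm
    rcases hm with hm | ⟨v, hm, hxv⟩
    · subst hm
      by_cases hxy : x ≤ y
      · simp only [Rm, List.dropWhile]
        rw [if_neg (by omega)]
        simp only [hxy, decide_true]
        exact ih x (some y) (Or.inr ⟨y, rfl, hxy⟩)
      · simp only [Rm, List.dropWhile]
        rw [if_pos (by omega)]
        simp [hxy]
    · subst hm
      by_cases hyv : y < v
      · by_cases hxy : x ≤ y
        · simp only [Rm, if_pos hyv, List.dropWhile]
          rw [if_neg (by omega)]
          simp only [hxy, decide_true]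
          exact ih x (some y) (Or.inr ⟨y, rfl, hxy⟩)
        · simp only [Rm, if_pos hyv, List.dropWhile]
          rw [if_pos (by omega)]
          simp [hxy]
      · have hxy : ¬ x ≤ y → False := by intro h; omega
        simp only [Rm, if_neg hyv]
        rw [if_neg (by omega)]
        exact ih x (some v) (Or.inr ⟨v, rfl, hxv⟩)

-- popping ≥-x elements from the end of s.reverse is dropWhile from the front of s
theorem popGE_reverse :
    ∀ (s : List Int) (x : Int),
      popGE s.reverse x = (s.dropWhile (fun r => decide (x ≤ r))).reverse := by
  intro s
  induction s with
  | nil => intro x; simp [popGE, popGEGo]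
  | cons y s' ih =>
    intro x
    have hL : (y :: s').reverse.getLast? = some y := by
      simp [List.getLast?_reverse]
    by_cases hxy : x ≤ y
    · have : popGE (y :: s').reverse x = popGE ((y :: s').reverse.dropLast) x :=
        popGE_ge hL hxy
      rw [this]
      have hdl : (y :: s').reverse.dropLast = s'.reverse := by
        simp [List.reverse_cons]
      rw [hdl, ih]
      simp [List.dropWhile, hxy]
    · rw [popGE_lt hL (by omega)]
      simp [List.dropWhile, hxy]

theorem key_pop (l : List Int) (x : Int) :
    popGE ((Rm none l).reverse) x = (Rm (some x) l).reverse := by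
  rw [popGE_reverse, Rm_dropWhile l x none (Or.inl rfl)]

-- the A-side fold, run over r.reverse, is the reversed record list of r
theorem foldA_eq_Rm :
    ∀ (r : List Int),
      r.reverse.foldl (fun s x => popGE s x ++ [x]) [] = (Rm none r).reverse := by
  intro r
  induction r with
  | nil => simp [Rm]
  | cons y r' ih =>
    rw [List.reverse_cons, List.foldl_append, ih, List.foldl_cons, List.foldl_nil]
    rw [key_pop]
    simp [Rm]

-- B's fold accumulates exactly the record list (the final threshold is irrelevant)
theorem foldB_fst :
    ∀ (l : List Int) (m : Option Int) (res : List Int),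
      (l.foldl
        (fun (st : List Int × Option Int) x =>
          match st.2 with
          | none => (st.1 ++ [x], some x)
          | some m => if x < m then (st.1 ++ [x], some x) else st)
        (res, m)).1 = res ++ Rm m l := by
  intro l
  induction l with
  | nil => intro m res; simp [Rm]
  | cons y l' ih =>
    intro m res
    cases m with
    | none => simp only [List.foldl_cons, Rm]; rw [ih]; simp
    | some v =>
      by_cases hyv : y < v
      · simp only [List.foldl_cons, Rm, if_pos hyv]
        rw [ih]; simp
      · simp only [List.foldl_cons, Rm, if_neg hyv]
        rw [ih]

-- ===== VERDICT (by name: the statement is the Claim_ definition above) =====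
theorem solution_spec : Claim_equal_solution := by
  intro arr _
  unfold Spec_solution solution solution_alt
  rw [loopA_foldl arr (2 * arr.length + 1) [] 0 (by simp only [List.length_nil]; omega)]
  rw [List.drop_zero, foldB_fst, List.nil_append]
  have h := foldA_eq_Rm arr.reverse
  rw [List.reverse_reverse] at h
  exact h
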